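-- pv_equiv track=rewrite | github.com/pavankumar1992/Python | token.py | token1
-- ===== SOURCE A (Python) =====
-- def token1(t):
--     r = len(t)
--     new_t = " "
--     ka = ['a', 'b', 'c', 'd', 'e', 'f', 'g', 'h', 'i', 'j', 'k', 'l', 'm', 'n', 'o', 'p', 'q', 'r', 's', 't', 'u', 'v', 'w', 'x', 'y', 'z']
--     kd = [0, 1, 2, 3, 4, 5, 6, 7, 8]
--     for c in range(r):
--         c=t[c]
--         if str(c) in ka or str(c) in kd or c == " ":
--             new_t = new_t + str(c)
--         else:
--             new_t = new_t + " " + str(c)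
--     new_t = new_t.split()
--     return new_t
-- ===== SOURCE B (Python) =====
-- def token1(t):
--     tokens = []
--     cur = ""
--     for ch in t:
--         if 'a' <= ch <= 'z':
--             cur += ch
--         elif ch.isspace():
--             if cur:
--                 tokens.append(cur)
--             cur = ""
--         else:
--             if cur:
--                 tokens.append(cur)
--             cur = ch
--     if cur:
--         tokens.append(cur)
--     return tokens
-- ===== Notes on version B (the rewrite author's own statement) =====
-- stated objective: simpler
-- what changed: A builds an intermediate string by prefixing a space before every non-lowercase character and then calls split(); B scans the string once with a (tokens, current) accumulator and emits tokens directly, with no intermediate string and no split pass.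
import Mathlib
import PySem

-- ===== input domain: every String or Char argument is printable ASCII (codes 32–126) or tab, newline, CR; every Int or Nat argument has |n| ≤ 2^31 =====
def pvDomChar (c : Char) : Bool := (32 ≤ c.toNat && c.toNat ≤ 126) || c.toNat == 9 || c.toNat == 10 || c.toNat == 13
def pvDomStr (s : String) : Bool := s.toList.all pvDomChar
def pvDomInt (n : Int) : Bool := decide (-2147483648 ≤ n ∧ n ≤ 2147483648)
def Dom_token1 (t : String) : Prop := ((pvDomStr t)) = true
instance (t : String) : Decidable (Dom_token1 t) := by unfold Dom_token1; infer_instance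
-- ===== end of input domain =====

-- B replaces A's build-a-space-injected-string-then-split() pass by a single scan that
-- emits tokens directly from an accumulator (simpler: no intermediate string, no split).

-- ===== PORT A =====
-- the list `ka` of A (its `kd` holds ints, and Python's `str(c) in kd` compares a 1-char
-- string with ints, hence is always False; the port carries the always-false test as `False`)
def token1Ka : List Char :=
  ['a','b','c','d','e','f','g','h','i','j','k','l','m',
   'n','o','p','q','r','s','t','u','v','w','x','y','z']

-- one iteration of A's `for` body, acting on `new_t` as a list of chars
def token1Step (acc : List Char) (c : Char) : List Char :=
  if c ∈ token1Ka ∨ False ∨ c = ' ' then acc ++ [c] else acc ++ [' ', c]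

def token1 (t : String) : List String :=
  let r := PySem.Str.len t
  -- `t[c]` for c in range(len(t)) is always in range; ported with pyGetD
  let new_t : List Char :=
    (PySem.List.pyRange 0 r 1).foldl
      (fun acc i => token1Step acc (PySem.List.pyGetD t.toList i ' ')) [' ']
  (PySem.Chars.split₀ new_t).map String.ofList

-- ===== PORT B =====
-- one iteration of B's loop on the state (tokens, cur)
def token1AltStep (s : List (List Char) × List Char) (ch : Char) : List (List Char) × List Char :=
  if 'a' ≤ ch ∧ ch ≤ 'z' then (s.1, s.2 ++ [ch])
  else if PySem.Chars.isspace ch then (if s.2.isEmpty then s.1 else s.1 ++ [s.2], [])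
  else (if s.2.isEmpty then s.1 else s.1 ++ [s.2], [ch])

def token1_alt (t : String) : List String :=
  let s := t.toList.foldl token1AltStep ([], [])
  ((if s.2.isEmpty then s.1 else s.1 ++ [s.2]).map String.ofList)

-- ===== PRECONDITION & SPEC =====
def Spec_token1 (t : String) (out : List String) : Prop := out = token1_alt t
instance (t : String) (out : List String) : Decidable (Spec_token1 t out) := by unfold Spec_token1; infer_instance

-- ===== CLAIM (what is proved, stated in full; the proofs are below) =====
def Claim_equal_token1 : Prop := ∀ (t : String), Dom_token1 t → Spec_token1 t (token1 t)

-- ===== LEMMAS AND PROOFS =====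

-- what A's loop body appends to new_t for one character
def emitA (c : Char) : List Char :=
  if c ∈ token1Ka ∨ False ∨ c = ' ' then [c] else [' ', c]

lemma token1Step_eq_append (acc : List Char) (c : Char) :
    token1Step acc c = acc ++ emitA c := by
  unfold token1Step emitA; split_ifs <;> rfl

lemma go_nil (cur : List Char) (acc : List (List Char)) :
    PySem.Chars.split₀.go [] cur acc =
      if cur.isEmpty then acc.reverse else (cur.reverse :: acc).reverse := rfl

lemma go_cons (c : Char) (rest cur : List Char) (acc : List (List Char)) :
    PySem.Chars.split₀.go (c :: rest) cur acc =
      if PySem.Chars.isspace c then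
        (if cur.isEmpty then PySem.Chars.split₀.go rest [] acc
         else PySem.Chars.split₀.go rest [] (cur.reverse :: acc))
      else PySem.Chars.split₀.go rest (c :: cur) acc := rfl

lemma mem_ka_of_bounds (c : Char) (h1 : ('a' : Char) ≤ c) (h2 : c ≤ 'z') :
    c ∈ token1Ka := by
  rw [Char.le_def, UInt32.le_iff_toNat_le] at h1 h2
  have h1' : 97 ≤ c.toNat := h1
  have h2' : c.toNat ≤ 122 := h2
  rw [← Char.ofNat_toNat c]
  interval_cases h : c.toNat <;> decide

lemma bounds_of_mem_ka (c : Char) (h : c ∈ token1Ka) : ('a' : Char) ≤ c ∧ c ≤ 'z' := by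
  fin_cases h <;> decide

lemma isspace_false_of_lower (c : Char) (h1 : ('a' : Char) ≤ c) (h2 : c ≤ 'z') :
    PySem.Chars.isspace c = false := by
  rw [Char.le_def, UInt32.le_iff_toNat_le] at h1 h2
  have h1' : 97 ≤ c.toNat := h1
  have h2' : c.toNat ≤ 122 := h2
  simp only [PySem.Chars.isspace, Bool.or_eq_false_iff, Bool.and_eq_false_iff,
    decide_eq_false_iff_not, Char.toNat] at *
  omega

-- the tokens-so-far-plus-pending-word closing step shared by split₀'s end and B's end
def finalizeB (s : List (List Char) × List Char) : List (List Char) :=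
  if s.2.isEmpty then s.1 else s.1 ++ [s.2]

-- CORE INVARIANT: running split₀'s worker over what A's loop emitted equals
-- running B's state machine over the original characters.
lemma go_emitA (cs : List Char) (tk : List (List Char)) (cur : List Char) :
    PySem.Chars.split₀.go (cs.flatMap emitA) cur.reverse tk.reverse =
      finalizeB (cs.foldl token1AltStep (tk, cur)) := by
  induction cs generalizing tk cur with
  | nil =>
    simp only [List.flatMap_nil, go_nil, List.foldl_nil, finalizeB, List.isEmpty_reverse]
    cases cur with
    | nil => simp
    | cons x xs => simp
  | cons c cs ih =>
    simp only [List.flatMap_cons, List.foldl_cons]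
    have hspc : PySem.Chars.isspace ' ' = true := by decide
    by_cases hlow : ('a' : Char) ≤ c ∧ c ≤ 'z'
    · have hmem := mem_ka_of_bounds c hlow.1 hlow.2
      have hnsp := isspace_false_of_lower c hlow.1 hlow.2
      have hA : emitA c = [c] := by unfold emitA; simp [hmem]
      rw [hA]
      simp only [List.cons_append, List.nil_append, go_cons, hnsp, Bool.false_eq_true,
        if_false]
      have hcur : (c :: cur.reverse) = (cur ++ [c]).reverse := by simp
      rw [hcur, ih tk (cur ++ [c])]
      unfold token1AltStep
      simp [hlow]
    · have hmemf : c ∉ token1Ka := fun hm => hlow (bounds_of_mem_ka c hm)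
      by_cases hsp : PySem.Chars.isspace c = true
      · -- whitespace: A emits [' '] (if c = ' ') or [' ', c]; split₀ only flushes
        have harg : token1AltStep (tk, cur) c = (finalizeB (tk, cur), []) := by
          unfold token1AltStep finalizeB; simp [hlow, hsp]
        rw [harg]
        have hih := ih (finalizeB (tk, cur)) []
        simp only [List.reverse_nil] at hih
        rw [← hih]
        by_cases hc : c = ' '
        · subst hc
          have hA : emitA ' ' = [' '] := by unfold emitA; simp
          rw [hA]
          simp only [List.cons_append, List.nil_append, go_cons, hspc, if_true]
          unfold finalizeB
          cases cur with
          | nil => simp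
          | cons x xs => simp
        · have hA : emitA c = [' ', c] := by unfold emitA; simp [hmemf, hc]
          rw [hA]
          simp only [List.cons_append, List.nil_append, go_cons, hspc, hsp, if_true,
            List.isEmpty_nil]
          unfold finalizeB
          cases cur with
          | nil => simp
          | cons x xs => simp
      · -- a special character: A emits [' ', c]; it flushes and opens a new token [c]
        have hc : c ≠ ' ' := by intro h; subst h; exact hsp hspc
        have harg : token1AltStep (tk, cur) c = (finalizeB (tk, cur), [c]) := by
          unfold token1AltStep finalizeB; simp [hlow, hsp]
        rw [harg]
        have hih := ih (finalizeB (tk, cur)) [c]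
        simp only [List.reverse_cons, List.reverse_nil, List.nil_append] at hih
        rw [← hih]
        have hA : emitA c = [' ', c] := by unfold emitA; simp [hmemf, hc]
        rw [hA]
        simp only [List.cons_append, List.nil_append, go_cons, hspc, hsp, if_true,
          Bool.false_eq_true, if_false, List.isEmpty_nil]
        unfold finalizeB
        cases cur with
        | nil => simp
        | cons x xs => simp

lemma split₀_space_cons (l : List Char) :
    PySem.Chars.split₀ (' ' :: l) = PySem.Chars.split₀.go l [] [] := by
  unfold PySem.Chars.split₀
  rw [go_cons]
  simp [PySem.Chars.isspace]

-- ===== VERDICT (by name: the statement is the Claim_ definition above) =====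
theorem token1_spec : Claim_equal_token1 := by
  intro t _
  unfold Spec_token1 token1 token1_alt
  simp only [PySem.Str.len_eq]
  rw [PySem.List.foldl_pyRange_zero_pyGetD' t.toList ' ' token1Step [' ']]
  have hstep : t.toList.foldl token1Step [' '] = [' '] ++ t.toList.flatMap emitA := by
    have : t.toList.foldl token1Step [' ']
        = t.toList.foldl (fun acc c => acc ++ emitA c) [' '] := by
      exact PySem.List.foldl_congr_mem _ _ _ _ (fun acc x _ => token1Step_eq_append acc x)
    rw [this, PySem.List.foldl_append_eq_flatMap]
  rw [hstep]
  simp only [List.cons_append, List.nil_append, split₀_space_cons]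
  have h := go_emitA t.toList [] []
  simp only [List.reverse_nil] at h
  rw [h]
  rfl
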